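-- pv_equiv track=rewrite | github.com/dwmitelman/ja_transliteration_tool | train/transliterate_nn.py | split_into_subgroups
-- ===== SOURCE A (Python) =====
-- def split_into_subgroups(words, g_size=20):
--     # groups_ar, groups_ja = [], []
--     groups = []
--
--     g_ar = [w_ar for w_ar, w_ja in words]
--     g_ja = [w_ja for w_ar, w_ja in words]
--     groups.extend([[g_ar[i:i + g_size], g_ja[i:i + g_size]] for i in range(0, len(g_ar), g_size)])
--     # groups_ja.extend([ for i in range(0, len(g_ja), g_size)])
--
--     for i in range(len(groups)):
--         groups[i][0] = [f"B-{l}" for w in groups[i][0] for l in w]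
--
--     return groups
-- ===== SOURCE B (Python) =====
-- def split_into_subgroups(words, g_size=20):
--     groups = []
--     cur_ar, cur_ja, cnt = [], [], 0
--     for w_ar, w_ja in words:
--         for l in w_ar:
--             cur_ar.append(f"B-{l}")
--         cur_ja.append(w_ja)
--         cnt += 1
--         if cnt == g_size:
--             groups.append([cur_ar, cur_ja])
--             cur_ar, cur_ja, cnt = [], [], 0
--     if cnt:
--         groups.append([cur_ar, cur_ja])
--     return groups
-- ===== Notes on version B (the rewrite author's own statement) =====
-- stated objective: alternative
-- what changed: Replaces A's unzip-then-slice-by-index-then-rewrite staging with a streaming single element-wise pass: one fold over the pairs maintaining a current partial group (prefixed ar chars, ja words, a counter) that is flushed whenever the counter reaches g_size, with a final flush for the leftover partial group; no index arithmetic or slicing at all.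
-- outside the precondition, e.g. on split_into_subgroups([('a', 'x')], -1): A returns [], B returns [[['B-a'], ['x']]]; on split_into_subgroups([('a', 'x')], 0): A raises ValueError, B returns [[['B-a'], ['x']]]
import Mathlib
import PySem

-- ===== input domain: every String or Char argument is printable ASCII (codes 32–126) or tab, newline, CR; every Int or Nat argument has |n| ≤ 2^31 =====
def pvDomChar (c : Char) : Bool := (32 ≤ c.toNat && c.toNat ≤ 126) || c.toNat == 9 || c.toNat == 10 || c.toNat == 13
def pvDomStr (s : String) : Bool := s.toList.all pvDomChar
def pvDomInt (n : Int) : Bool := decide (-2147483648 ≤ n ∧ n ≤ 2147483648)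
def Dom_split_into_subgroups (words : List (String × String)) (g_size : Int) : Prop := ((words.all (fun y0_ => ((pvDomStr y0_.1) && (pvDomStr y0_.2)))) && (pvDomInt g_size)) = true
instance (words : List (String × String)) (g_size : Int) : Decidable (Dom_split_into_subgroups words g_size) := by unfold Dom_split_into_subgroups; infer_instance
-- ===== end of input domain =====

-- B replaces A's unzip/index-slice/rewrite staging by one streaming element-wise fold with a flush-on-full accumulator (objective: alternative).

-- ===== PORT A =====
def split_into_subgroups (words : List (String × String)) (g_size : Int) : List (List (List String)) :=
  let groups : List (List (List String)) := []
  let g_ar := words.map (fun p => p.1)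
  let g_ja := words.map (fun p => p.2)
  let groups := groups ++ ((PySem.List.pyRange 0 g_ar.length g_size).map (fun i =>
      [PySem.List.slice g_ar (some i) (some (i + g_size)),
       PySem.List.slice g_ja (some i) (some (i + g_size))]))
  -- for i in range(len(groups)): groups[i][0] = [f"B-{l}" for w in groups[i][0] for l in w]
  let groups := groups.map (fun g =>
      match g with
      | a :: rest => (a.flatMap (fun w => w.toList.map (fun l => "B-" ++ l.toString))) :: rest
      | [] => [])
  groups

-- ===== PORT B =====
def split_into_subgroups_alt (words : List (String × String)) (g_size : Int) : List (List (List String)) :=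
  let st := words.foldl
    (fun (st : List (List (List String)) × List String × List String × Int) p =>
      let cur_ar := st.2.1 ++ p.1.toList.map (fun l => "B-" ++ l.toString)
      let cur_ja := st.2.2.1 ++ [p.2]
      let cnt := st.2.2.2 + 1
      if cnt = g_size then (st.1 ++ [[cur_ar, cur_ja]], [], [], 0)
      else (st.1, cur_ar, cur_ja, cnt))
    ([], [], [], 0)
  if st.2.2.2 ≠ 0 then st.1 ++ [[st.2.1, st.2.2.1]] else st.1

-- ===== PRECONDITION & SPEC =====
-- Pre_ requires a positive chunk size, the natural domain of a chunking function: at g_size = 0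
-- Python's range raises ValueError, and a negative chunk size is outside the natural domain
-- (no chunking is specified there, so A's and B's values are both arbitrary).
def Pre_split_into_subgroups (words : List (String × String)) (g_size : Int) : Prop := 1 ≤ g_size
instance (words : List (String × String)) (g_size : Int) : Decidable (Pre_split_into_subgroups words g_size) := by unfold Pre_split_into_subgroups; infer_instance
def pvWitness_split_into_subgroups : (List (String × String)) × Int := ([("ab", "x"), ("c", "y"), ("d", "z")], 2)
def Spec_split_into_subgroups (words : List (String × String)) (g_size : Int) (out : List (List (List String))) : Prop := out = split_into_subgroups_alt words g_size
instance (words : List (String × String)) (g_size : Int) (out : List (List (List String))) : Decidable (Spec_split_into_subgroups words g_size out) := by unfold Spec_split_into_subgroups; infer_instance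

-- ===== CLAIM (what is proved, stated in full; the proofs are below) =====
def Claim_equal_split_into_subgroups : Prop := ∀ (words : List (String × String)) (g_size : Int), Dom_split_into_subgroups words g_size → Pre_split_into_subgroups words g_size → Spec_split_into_subgroups words g_size (split_into_subgroups words g_size)

-- ===== LEMMAS AND PROOFS =====

-- the per-character "B-" prefixing of one arabic word
def pvPref (s : String) : List String := s.toList.map (fun l => "B-" ++ l.toString)

-- the group built from one chunk of pairs
def pvF (chunk : List (String × String)) : List (List String) :=
  [chunk.flatMap (fun p => pvPref p.1), chunk.map (fun p => p.2)]

-- chunks of size gN (gN ≥ 1 intended), head-peeling form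
def pvChunks (gN : Nat) : List (String × String) → List (List (List String))
  | [] => []
  | p :: t => pvF (p :: t.take (gN - 1)) :: pvChunks gN (t.drop (gN - 1))
termination_by ws => ws.length
decreasing_by simp [List.length_drop]

theorem pvChunks_nil (gN : Nat) : pvChunks gN [] = [] := by rw [pvChunks.eq_def]

theorem pvChunks_cons (gN : Nat) (p : String × String) (t : List (String × String)) :
    pvChunks gN (p :: t) = pvF (p :: t.take (gN - 1)) :: pvChunks gN (t.drop (gN - 1)) := by
  rw [pvChunks.eq_def]

-- B's fold step and finalizer, restated for the proofs
def pvStep (g_size : Int) (st : List (List (List String)) × List String × List String × Int)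
    (p : String × String) : List (List (List String)) × List String × List String × Int :=
  let cur_ar := st.2.1 ++ p.1.toList.map (fun l => "B-" ++ l.toString)
  let cur_ja := st.2.2.1 ++ [p.2]
  let cnt := st.2.2.2 + 1
  if cnt = g_size then (st.1 ++ [[cur_ar, cur_ja]], [], [], 0)
  else (st.1, cur_ar, cur_ja, cnt)

def pvFin (st : List (List (List String)) × List String × List String × Int) : List (List (List String)) :=
  if st.2.2.2 ≠ 0 then st.1 ++ [[st.2.1, st.2.2.1]] else st.1

-- what B computes from a mid-chunk state onwards
def pvPartial (g_size : Int) (ar ja : List String) (c : Int) : List (String × String) → List (List (List String))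
  | [] => if c = 0 then [] else [[ar, ja]]
  | p :: t =>
    if c + 1 = g_size then [[ar ++ pvPref p.1, ja ++ [p.2]]] ++ pvPartial g_size [] [] 0 t
    else pvPartial g_size (ar ++ pvPref p.1) (ja ++ [p.2]) (c + 1) t

theorem pvAlt_eq (words : List (String × String)) (g : Int) :
    split_into_subgroups_alt words g = pvFin (words.foldl (pvStep g) ([], [], [], 0)) := rfl

theorem pvFold_partial (g : Int) (ws : List (String × String)) :
    ∀ (groups : List (List (List String))) (ar ja : List String) (c : Int),
    pvFin (ws.foldl (pvStep g) (groups, ar, ja, c)) = groups ++ pvPartial g ar ja c ws := by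
  induction ws with
  | nil =>
    intro groups ar ja c
    simp only [List.foldl, pvFin, pvPartial]
    by_cases h : c = 0 <;> simp [h]
  | cons p t ih =>
    intro groups ar ja c
    simp only [List.foldl, pvPartial]
    by_cases h : c + 1 = g
    · simp [pvStep, h, ih, pvPref, List.append_assoc]
    · simp [pvStep, h, ih, pvPref]

theorem pvChunks_if (gN : Nat) (h : 1 ≤ gN) (t : List (String × String)) :
    (if t = [] then ([] : List (List (List String)))
     else [pvF (t.take gN)] ++ pvChunks gN (t.drop gN)) = pvChunks gN t := by
  cases t with
  | nil => simp [pvChunks_nil]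
  | cons q r =>
    simp only [if_neg (List.cons_ne_nil q r)]
    rw [pvChunks_cons]
    obtain ⟨m, rfl⟩ : ∃ m, gN = m + 1 := ⟨gN - 1, by omega⟩
    simp [List.take_succ_cons, List.drop_succ_cons]

theorem pvPartial_chunks (g : Int) (hg : 1 ≤ g) (ws : List (String × String)) :
    ∀ (ar ja : List String) (c : Int), 0 ≤ c → c < g →
    pvPartial g ar ja c ws =
      if ws = [] ∧ c = 0 then []
      else [[ar ++ (ws.take (g - c).toNat).flatMap (fun p => pvPref p.1),
             ja ++ (ws.take (g - c).toNat).map (fun p => p.2)]]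
           ++ pvChunks g.toNat (ws.drop (g - c).toNat) := by
  induction ws with
  | nil =>
    intro ar ja c hc0 hcg
    simp only [pvPartial, List.take_nil, List.drop_nil]
    by_cases h : c = 0 <;> simp [h, pvChunks_nil]
  | cons p t ih =>
    intro ar ja c hc0 hcg
    rw [pvPartial]
    by_cases h : c + 1 = g
    · rw [if_pos h]
      have hk : (g - c).toNat = 1 := by omega
      rw [ih [] [] 0 le_rfl (by omega)]
      simp only [hk, List.take_succ_cons, List.take_zero, List.drop_succ_cons, List.drop_zero,
        if_neg (by simp : ¬(p :: t = [] ∧ c = 0))]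
      have := pvChunks_if g.toNat (by omega) t
      simp only [List.nil_append] at this ⊢
      rw [← this]
      by_cases ht : t = [] <;> simp [ht, pvF]
    · rw [if_neg h]
      rw [ih (ar ++ pvPref p.1) (ja ++ [p.2]) (c + 1) (by omega) (by omega)]
      have hk : (g - c).toNat = (g - (c + 1)).toNat + 1 := by omega
      simp only [if_neg (by omega : ¬(t = [] ∧ c + 1 = 0)),
        if_neg (by simp : ¬(p :: t = [] ∧ c = 0)), hk,
        List.take_succ_cons, List.drop_succ_cons, List.flatMap_cons, List.map_cons,
        List.append_assoc, List.cons_append, List.nil_append]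

-- A as a map over chunk start indices
theorem pvA_eq (words : List (String × String)) (g : Int) :
    split_into_subgroups words g =
      (PySem.List.pyRange 0 words.length g).map (fun i =>
        pvF (PySem.List.slice words (some i) (some (i + g)))) := by
  unfold split_into_subgroups
  simp only [List.nil_append, List.map_map, List.length_map]
  refine List.map_congr_left (fun i _ => ?_)
  simp [pvF, pvPref, PySem.List.slice, ← List.map_drop, ← List.map_take, List.flatMap_map]

theorem pvRange_nil (b g : Int) (hg : 0 < g) (hb : b ≤ 0) :
    PySem.List.pyRange 0 b g = [] := by
  rw [PySem.List.pyRange_of_pos _ _ hg]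
  simp [if_neg (by omega : ¬(0 : Int) < b)]

theorem pvRange_cons (b g : Int) (hg : 0 < g) (hb : 0 < b) :
    PySem.List.pyRange 0 b g = 0 :: (PySem.List.pyRange 0 (b - g) g).map (· + g) := by
  rw [PySem.List.pyRange_of_pos _ _ hg, PySem.List.pyRange_of_pos _ _ hg]
  have hdiv : (b - 0 + g - 1) / g = (b - 1) / g + 1 := by
    have : b - 0 + g - 1 = (b - 1) + 1 * g := by ring
    rw [this, Int.add_mul_ediv_right _ _ (by omega : g ≠ 0)]
  have hnn : 0 ≤ (b - 1) / g := Int.ediv_nonneg (by omega) (by omega)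
  rw [if_pos hb, hdiv]
  have htn : ((b - 1) / g + 1).toNat = ((b - 1) / g).toNat + 1 := by omega
  rw [htn, List.range_succ_eq_map]
  by_cases hgb : g < b
  · rw [if_pos (by omega : (0:Int) < b - g)]
    have : b - g - 0 + g - 1 = b - 1 := by ring
    rw [this]
    simp only [List.map_cons, List.map_map]
    congr 1
    · simp
    · refine List.map_congr_left (fun k _ => ?_)
      simp only [Function.comp]
      push_cast
      ring
  · rw [if_neg (by omega : ¬(0:Int) < b - g)]
    have : (b - 1) / g = 0 := Int.ediv_eq_zero_of_lt (by omega) (by omega)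
    simp [this]
theorem pvSlice_shift (ws : List (String × String)) (i g : Int) (hi : 0 ≤ i) (hg : 0 < g) :
    PySem.List.slice ws (some (i + g)) (some (i + g + g)) =
      PySem.List.slice (ws.drop g.toNat) (some i) (some (i + g)) := by
  rw [PySem.List.slice_toNat _ (by omega) (by omega),
      PySem.List.slice_toNat _ hi (by omega)]
  rw [List.drop_drop]
  congr 1
  · omega
  · congr 1; omega

theorem pvMap_chunks (g : Int) (hg : 1 ≤ g) (ws : List (String × String)) :
    (PySem.List.pyRange 0 ws.length g).map (fun i =>
        pvF (PySem.List.slice ws (some i) (some (i + g)))) = pvChunks g.toNat ws := by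
  cases ws with
  | nil =>
    rw [pvChunks_nil]
    simp [pvRange_nil 0 g (by omega) le_rfl]
  | cons p t =>
    rw [pvRange_cons _ g (by omega) (by exact_mod_cast Nat.succ_pos t.length)]
    have hfirst : PySem.List.slice (p :: t) (some 0) (some (0 + g)) = (p :: t).take g.toNat := by
      rw [PySem.List.slice_zero_start, zero_add, PySem.List.slice_to _ (by omega)]
    have hrange : PySem.List.pyRange 0 ((p :: t).length - g) g
        = PySem.List.pyRange 0 (((p :: t).drop g.toNat).length : Int) g := by
      rcases Nat.lt_or_ge ((p :: t).length) (g.toNat) with hlt | hle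
      · rw [pvRange_nil _ g (by omega) (by omega),
            pvRange_nil _ g (by omega)
              (by simp only [List.length_drop, List.length_cons] at hlt ⊢; omega)]
      · congr 1
        simp only [List.length_drop]
        omega
    simp only [List.map_cons, List.map_map, Function.comp_def, hfirst, hrange]
    have hmap : ∀ i ∈ PySem.List.pyRange 0 (((p :: t).drop g.toNat).length : Int) g,
        pvF (PySem.List.slice (p :: t) (some (i + g)) (some (i + g + g)))
          = pvF (PySem.List.slice ((p :: t).drop g.toNat) (some i) (some (i + g))) := by
      intro i hi
      have h0i : 0 ≤ i := by
        rw [PySem.List.pyRange_of_pos _ _ (by omega : (0:Int) < g)] at hi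
        obtain ⟨k, _, rfl⟩ := List.mem_map.mp hi
        positivity
      rw [pvSlice_shift _ _ _ h0i (by omega)]
    rw [List.map_congr_left hmap, pvMap_chunks g hg ((p :: t).drop g.toNat), pvChunks_cons]
    obtain ⟨m, hm⟩ : ∃ m, g.toNat = m + 1 := ⟨g.toNat - 1, by omega⟩
    simp [hm, List.take_succ_cons, List.drop_succ_cons]
termination_by ws.length
decreasing_by simp [List.length_drop]; omega

-- ===== VERDICT (by name: the statement is the Claim_ definition above) =====
theorem split_into_subgroups_spec : Claim_equal_split_into_subgroups := by
  intro words g _ hg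
  have hg' : (1 : Int) ≤ g := hg
  unfold Spec_split_into_subgroups
  rw [pvA_eq, pvMap_chunks g hg', pvAlt_eq, pvFold_partial, List.nil_append,
      pvPartial_chunks g hg' words [] [] 0 le_rfl (by omega)]
  rw [← pvChunks_if g.toNat (by omega) words]
  by_cases hw : words = [] <;> simp [hw, pvF]
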